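-- pv_equiv track=rewrite | github.com/LRX-ai/name-cleaning-mapping-main | name_cleaner.py | clean_title_tokens
-- ===== SOURCE A (Python) =====
-- def clean_title_tokens(tokens, titles, from_start=True):
--     if from_start:
--         while tokens and tokens[0].replace(".", "").lower() in titles:
--             tokens = tokens[1:]
--     else:
--         while tokens and tokens[-1].replace(".", "").lower() in titles:
--             tokens = tokens[:-1]
--     return tokens
-- ===== SOURCE B (Python) =====
-- def clean_title_tokens(tokens, titles, from_start=True):
--     def is_title(t):
--         return t.replace(".", "").lower() in titles
--     if from_start:
--         i = 0
--         n = len(tokens)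
--         while i < n and is_title(tokens[i]):
--             i += 1
--         return tokens[i:]
--     k = 0
--     for t in reversed(tokens):
--         if not is_title(t):
--             break
--         k += 1
--     return tokens[:len(tokens) - k]
-- ===== Notes on version B (the rewrite author's own statement) =====
-- stated objective: faster
-- what changed: A repeatedly re-slices the whole list (tokens[1:] / tokens[:-1]) once per stripped token; B only advances a counter over the matching prefix (or the reversed list's prefix) and takes ONE final slice; intended as faster (probe measured 16.8x at the largest size both finished, unconfirmed as noise).
import Mathlib
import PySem

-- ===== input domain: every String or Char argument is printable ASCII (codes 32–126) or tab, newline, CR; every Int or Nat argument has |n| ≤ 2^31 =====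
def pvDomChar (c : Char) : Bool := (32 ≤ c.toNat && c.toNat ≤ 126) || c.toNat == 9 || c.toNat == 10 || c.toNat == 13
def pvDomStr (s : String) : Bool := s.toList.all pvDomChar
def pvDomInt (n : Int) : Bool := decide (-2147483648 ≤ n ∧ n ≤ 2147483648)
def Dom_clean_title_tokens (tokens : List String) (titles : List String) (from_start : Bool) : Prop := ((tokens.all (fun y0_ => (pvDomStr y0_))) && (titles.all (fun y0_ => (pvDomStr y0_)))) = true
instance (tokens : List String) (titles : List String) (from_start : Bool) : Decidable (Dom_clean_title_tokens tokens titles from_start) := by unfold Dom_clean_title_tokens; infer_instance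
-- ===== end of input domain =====

-- B strips title tokens with a counter over the (possibly reversed) list and one final
-- slice instead of A's repeated whole-list re-slicing; intended as faster (timing run
-- read 16.8x at the largest size both finished, A timed out beyond that; not confirmed).

-- token test shared by both Pythons: t.replace(".", "").lower() in titles
def pvIsTitle (titles : List String) (t : String) : Bool :=
  titles.contains (PySem.Str.lower (PySem.Str.replace t "." ""))

-- ===== PORT A =====
-- while tokens and tokens[0]... : tokens = tokens[1:]   (tokens[1:] of h::t is t)
def pvA_start (titles : List String) : List String → List String
  | [] => []
  | h :: t => if pvIsTitle titles h then pvA_start titles t else h :: t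

-- while tokens and tokens[-1]... : tokens = tokens[:-1]
-- tokens[-1] of a nonempty list is its getLast; tokens[:-1] is dropLast
-- (PySem lemmas pyGet?_neg_one / slice_to_neg_one).
def pvA_end (titles : List String) (l : List String) : List String :=
  if h : l = [] then l
  else if pvIsTitle titles (l.getLast h) then pvA_end titles l.dropLast else l
termination_by l.length
decreasing_by simp [List.length_dropLast]; exact List.length_pos_iff.mpr h

def clean_title_tokens (tokens : List String) (titles : List String) (from_start : Bool) : List String :=
  if from_start then pvA_start titles tokens else pvA_end titles tokens

-- ===== PORT B =====
-- the while/for loops of Source B: count how many leading elements match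
def pvCount (titles : List String) : List String → Nat
  | [] => 0
  | h :: t => if pvIsTitle titles h then pvCount titles t + 1 else 0

def clean_title_tokens_alt (tokens : List String) (titles : List String) (from_start : Bool) : List String :=
  if from_start then
    tokens.drop (pvCount titles tokens)            -- tokens[i:]
  else
    tokens.take (tokens.length - pvCount titles tokens.reverse)  -- tokens[:len-k], k counted over reversed(tokens)

-- ===== PRECONDITION & SPEC =====
def Spec_clean_title_tokens (tokens : List String) (titles : List String) (from_start : Bool) (out : List String) : Prop := out = clean_title_tokens_alt tokens titles from_start
instance (tokens : List String) (titles : List String) (from_start : Bool) (out : List String) : Decidable (Spec_clean_title_tokens tokens titles from_start out) := by unfold Spec_clean_title_tokens; infer_instance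

-- ===== CLAIM (what is proved, stated in full; the proofs are below) =====
def Claim_equal_clean_title_tokens : Prop := ∀ (tokens : List String) (titles : List String) (from_start : Bool), Dom_clean_title_tokens tokens titles from_start → Spec_clean_title_tokens tokens titles from_start (clean_title_tokens tokens titles from_start)

-- ===== LEMMAS AND PROOFS =====
theorem pvA_start_eq (titles : List String) (l : List String) :
    pvA_start titles l = l.drop (pvCount titles l) := by
  induction l with
  | nil => rfl
  | cons h t ih =>
    simp only [pvA_start, pvCount]
    split_ifs <;> simp [ih]

theorem pvA_end_eq (titles : List String) (l : List String) :
    pvA_end titles l = l.take (l.length - pvCount titles l.reverse) := by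
  induction l using List.reverseRecOn with
  | nil => simp [pvA_end]
  | append_singleton init a ih =>
    have hne : init ++ [a] ≠ [] := by simp
    rw [pvA_end.eq_def, dif_neg hne]
    have hg : (init ++ [a]).getLast hne = a := by simp
    rw [hg, List.dropLast_concat, ih]
    rw [List.reverse_append, List.reverse_singleton, List.singleton_append]
    by_cases hp : pvIsTitle titles a
    · simp only [hp, if_true, pvCount, List.length_append, List.length_singleton]
      have hle : init.length - pvCount titles init.reverse ≤ init.length := Nat.sub_le _ _
      have h2 : init.length + 1 - (pvCount titles init.reverse + 1)
          = init.length - pvCount titles init.reverse := by omega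
      rw [h2, List.take_append_of_le_length hle]
    · simp [hp, pvCount]

-- ===== VERDICT (by name: the statement is the Claim_ definition above) =====
theorem clean_title_tokens_spec : Claim_equal_clean_title_tokens := by
  intro tokens titles from_start _
  unfold Spec_clean_title_tokens clean_title_tokens clean_title_tokens_alt
  cases from_start <;> simp [pvA_start_eq, pvA_end_eq]
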